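-- pv_equiv track=rewrite | github.com/appmlk/ConDefects | Code/arc173_a/Python/51750768/faultyVersion.py | solve
-- ===== SOURCE A (Python) =====
-- def solve(N):
--     p = str(N)
--     M = len(str(N))
--     dp = [[[0] * 10 for _ in range(2)] for _ in range(M + 1)]
--     dp[0][0][0] = 1
--     for i in range(M):
--         di = int(p[i])
--         for smaller in range(2):
--             Lim = 10 if smaller else di + 1
--             for j in range(10):
--                 for x in range(Lim):
--                     if j == x:
--                         continue
--                     dp[i + 1][smaller | (x < di)][x] += dp[i][smaller][j]
--     s = sum(dp[M][0]) + sum(dp[M][1])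
--     return s
-- ===== SOURCE B (Python) =====
-- def solve(N):
--     p = str(N)
--     M = len(p)
--     total = 0
--     prev = 0
--     for i, ch in enumerate(p):
--         di = int(ch)
--         total += (di - (1 if prev < di else 0)) * 9 ** (M - 1 - i)
--         if di == prev:
--             break
--         prev = di
--     else:
--         total += 1
--     return total
-- ===== Notes on version B (the rewrite author's own statement) =====
-- stated objective: simpler
-- what changed: Replaced the per-digit DP table over (position, tight-flag, last-digit) states by a single left-to-right scan of the digits that accumulates, at each position, the number of admissible digits below the tight prefix digit times the count of free completions, reproducing A's seed and tight-flag semantics exactly.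
import Mathlib
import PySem

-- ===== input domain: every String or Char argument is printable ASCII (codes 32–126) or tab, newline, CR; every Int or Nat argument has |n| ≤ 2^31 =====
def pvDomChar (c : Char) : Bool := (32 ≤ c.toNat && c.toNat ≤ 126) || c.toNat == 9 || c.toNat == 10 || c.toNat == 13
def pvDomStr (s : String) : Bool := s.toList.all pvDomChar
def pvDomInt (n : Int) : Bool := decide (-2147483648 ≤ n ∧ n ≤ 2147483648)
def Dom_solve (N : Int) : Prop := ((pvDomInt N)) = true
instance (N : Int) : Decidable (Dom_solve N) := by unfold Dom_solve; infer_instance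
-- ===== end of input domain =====

-- B replaces A's DP table over (position, tight-flag, last-digit) states by a single
-- left-to-right scan of the digits of N — same return value, no table.

-- ===== PORT A =====
-- the dp table dp[i][smaller][x] of A, encoded as a mapping (i, smaller, x) ↦ value
-- (cells never written keep their initial value 0, read via get3's default)
abbrev Tbl := PySem.Dict (Nat × Nat × Nat) Int

-- int(p[i]) for a single char: exact on the decimal-digit chars str(N) produces when 0 ≤ N (Pre_)
def digitVal (c : Char) : Int := (PySem.Int.ofChars? [c]).getD 0

-- dp[a][b][c], dp[a][b][c] += v  (the reads and `+=` of A)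
def get3 (dp : Tbl) (a b c : Nat) : Int := dp.getD (a, b, c) 0
def upd3 (dp : Tbl) (a b c : Nat) (v : Int) : Tbl := dp.modify (a, b, c) 0 (· + v)

-- smaller | (x < di)  (smaller ∈ {0,1})
def updBit (sm di x : Nat) : Nat := if sm = 1 ∨ x < di then 1 else 0

-- the body of A's `for i in range(M)` loop
def bodyA (p : List Char) (dp : Tbl) (i : Nat) : Tbl :=
  let di := (digitVal (p.getD i '0')).toNat   -- di = int(p[i]); i < len(p) always
  (List.range 2).foldl (fun dp smaller =>
    let Lim := if smaller = 1 then 10 else di + 1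
    (List.range 10).foldl (fun dp j =>
      (List.range Lim).foldl (fun dp x =>
        if j = x then dp
        else upd3 dp (i + 1) (updBit smaller di x) x (get3 dp i smaller j)) dp) dp) dp

def solve (N : Int) : Int :=
  let p := (PySem.Int.toStr N).toList
  let M := (PySem.Int.toStr N).toList.length
  let dp0 : Tbl := PySem.Dict.empty.insert (0, 0, 0) 1   -- all-zero table, then dp[0][0][0] = 1
  let dp := (List.range M).foldl (bodyA p) dp0
  (List.range 10).foldl (fun s x => s + get3 dp M 0 x) 0 +
    (List.range 10).foldl (fun s x => s + get3 dp M 1 x) 0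

-- ===== PORT B =====
-- the for-loop of Source B (with its for/else: the [] case is the `else: total += 1`)
def solveAltGo (M : Nat) (cs : List Char) (i : Nat) (prev : Int) (total : Int) : Int :=
  match cs with
  | [] => total + 1
  | ch :: rest =>
    let di := digitVal ch
    let total' := total + (di - if prev < di then 1 else 0) * (9 : Int) ^ (M - 1 - i)
    if di = prev then total' else solveAltGo M rest (i + 1) di total'

def solve_alt (N : Int) : Int :=
  let p := (PySem.Int.toStr N).toList
  solveAltGo p.length p 0 0 0

-- ===== PRECONDITION & SPEC =====
-- A (and B) raise ValueError on N < 0: int('-') on the sign char of str(N).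
def Pre_solve (N : Int) : Prop := 0 ≤ N
instance (N : Int) : Decidable (Pre_solve N) := by unfold Pre_solve; infer_instance
def pvWitness_solve : Int := 1234
def Spec_solve (N : Int) (out : Int) : Prop := out = solve_alt N
instance (N : Int) (out : Int) : Decidable (Spec_solve N out) := by unfold Spec_solve; infer_instance

-- ===== CLAIM (what is proved, stated in full; the proofs are below) =====
def Claim_equal_solve : Prop := ∀ (N : Int), Dom_solve N → Pre_solve N → Spec_solve N (solve N)

-- ===== LEMMAS AND PROOFS =====

def sum10 (f : Nat → Int) : Int := ∑ c ∈ Finset.range 10, f c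

-- the tight row after consuming digit d (A's dp[i+1][0])
def stepT (d : Nat) (t : Nat → Int) : Nat → Int :=
  fun c => if c = d then sum10 t - t d else 0

-- the smaller row after consuming digit d (A's dp[i+1][1])
def stepS (d : Nat) (t s : Nat → Int) : Nat → Int :=
  fun c => if c < 10 then (sum10 s - s c) + (if c < d then sum10 t - t c else 0) else 0

def stepPair (d : Nat) (ts : (Nat → Int) × (Nat → Int)) : (Nat → Int) × (Nat → Int) :=
  (stepT d ts.1, stepS d ts.1 ts.2)

-- common spec: both ports compute gAcc (digits of N) 0
def gAcc : List Nat → Nat → Int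
  | [], _ => 1
  | d :: ds, prev =>
    ((d : Int) - if prev < d then 1 else 0) * 9 ^ ds.length + (if d = prev then 0 else gAcc ds d)

def tblOK (dp : Tbl) (k : Nat) (ts : (Nat → Int) × (Nat → Int)) : Prop :=
  (∀ c, get3 dp k 0 c = ts.1 c) ∧ (∀ c, get3 dp k 1 c = ts.2 c) ∧
  (∀ a b c, k < a → get3 dp a b c = 0)

lemma digitVal_digitChar (k : Nat) (hk : k < 10) : digitVal (Nat.digitChar k) = (k : Int) := by
  interval_cases k <;> decide

lemma core_digits (fuel n : Nat) : ∀ ds, (∀ c ∈ ds, ∃ k, k < 10 ∧ c = Nat.digitChar k) →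
    ∀ c ∈ Nat.toDigitsCore 10 fuel n ds, ∃ k, k < 10 ∧ c = Nat.digitChar k := by
  induction fuel generalizing n with
  | zero => intro ds h c hc; exact h c hc
  | succ fuel ih =>
    intro ds h c hc
    rw [Nat.toDigitsCore] at hc
    split at hc
    · rcases List.mem_cons.mp hc with h1 | h2
      · exact ⟨n % 10, Nat.mod_lt _ (by norm_num), h1⟩
      · exact h _ h2
    · refine ih _ _ ?_ c hc
      intro c' hc'
      rcases List.mem_cons.mp hc' with h1 | h2
      · exact ⟨n % 10, Nat.mod_lt _ (by norm_num), h1⟩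
      · exact h _ h2

lemma toChars_digits (N : Int) (hN : 0 ≤ N) :
    ∀ c ∈ PySem.Int.toChars N, ∃ k, k < 10 ∧ c = Nat.digitChar k := by
  unfold PySem.Int.toChars
  rw [if_neg (by omega)]
  exact core_digits _ _ [] (by simp)

lemma listSum_range (n : Nat) (g : Nat → Int) :
    ((List.range n).map g).sum = ∑ j ∈ Finset.range n, g j := by
  induction n with
  | zero => simp
  | succ n ih => rw [List.range_succ, Finset.sum_range_succ, ← ih]; simp

lemma listSumNe (f : Nat → Int) (c : Nat) (hc : c < 10) :
    ((List.range 10).map (fun j => if j = c then 0 else f j)).sum = sum10 f - f c := by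
  rw [listSum_range, sum10]
  calc ∑ j ∈ Finset.range 10, (if j = c then 0 else f j)
      = ∑ j ∈ Finset.range 10, f j - ∑ j ∈ Finset.range 10, (if j = c then f j else 0) := by
        rw [← Finset.sum_sub_distrib]; apply Finset.sum_congr rfl; intro j _; split <;> ring
    _ = _ := by rw [Finset.sum_ite_eq' (Finset.range 10) c f]; simp [Finset.mem_range.mpr hc]

lemma get3_upd3 (dp : Tbl) (a b c : Nat) (v : Int) (a' b' c' : Nat) :
    get3 (upd3 dp a b c v) a' b' c'
      = get3 dp a' b' c' + if a' = a ∧ b' = b ∧ c' = c then v else 0 := by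
  simp only [get3, upd3, PySem.Dict.getD_modify, Prod.mk.injEq]
  split_ifs with h
  · obtain ⟨rfl, rfl, rfl⟩ := h; ring
  · ring

lemma get3_init (a b c : Nat) :
    get3 (PySem.Dict.empty.insert ((0 : Nat), (0 : Nat), (0 : Nat)) (1 : Int)) a b c
      = if a = 0 ∧ b = 0 ∧ c = 0 then 1 else 0 := by
  simp only [get3, PySem.Dict.getD_insert, PySem.Dict.getD_empty, Prod.mk.injEq]

lemma foldX (i sm di j : Nat) (xs : List Nat) (hxs : xs.Nodup) (dp : Tbl) (a b c : Nat) :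
    get3 (xs.foldl (fun dp x => if j = x then dp
        else upd3 dp (i + 1) (updBit sm di x) x (get3 dp i sm j)) dp) a b c
      = get3 dp a b c
        + if a = i + 1 ∧ c ∈ xs ∧ j ≠ c ∧ b = updBit sm di c then get3 dp i sm j else 0 := by
  induction xs generalizing dp with
  | nil => simp
  | cons x rest ih =>
    have hx : x ∉ rest := (List.nodup_cons.mp hxs).1
    have hr : rest.Nodup := (List.nodup_cons.mp hxs).2
    rw [List.foldl_cons]
    by_cases hjx : j = x
    · rw [if_pos hjx, ih hr]
      have he : (a = i + 1 ∧ c ∈ x :: rest ∧ j ≠ c ∧ b = updBit sm di c) ↔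
          (a = i + 1 ∧ c ∈ rest ∧ j ≠ c ∧ b = updBit sm di c) := by
        subst hjx; simp only [List.mem_cons]; constructor <;> rintro ⟨h1, h2, h3, h4⟩
        · exact ⟨h1, h2.resolve_left (fun h => h3 h.symm), h3, h4⟩
        · exact ⟨h1, Or.inr h2, h3, h4⟩
      rw [if_congr he rfl rfl]
    · rw [if_neg hjx, ih hr]
      have hv : get3 (upd3 dp (i + 1) (updBit sm di x) x (get3 dp i sm j)) i sm j
          = get3 dp i sm j := by
        rw [get3_upd3, if_neg (by rintro ⟨h1, -⟩; omega)]; ring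
      rw [hv, get3_upd3]
      simp only [List.mem_cons]
      by_cases hcx : c = x
      · subst hcx
        have hcr : c ∉ rest := hx
        split_ifs with h1 h2 h2 <;> simp_all
      · split_ifs with h1 h2 h2 <;> simp_all

lemma foldJ (i sm di : Nat) (xs : List Nat) (hxs : xs.Nodup) (js : List Nat) (dp : Tbl)
    (a b c : Nat) :
    get3 (js.foldl (fun dp j => xs.foldl (fun dp x => if j = x then dp
        else upd3 dp (i + 1) (updBit sm di x) x (get3 dp i sm j)) dp) dp) a b c
      = get3 dp a b c + if a = i + 1 ∧ c ∈ xs ∧ b = updBit sm di c then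
          ((js.map (fun j => if j = c then 0 else get3 dp i sm j)).sum) else 0 := by
  induction js generalizing dp with
  | nil => simp
  | cons j js ih =>
    rw [List.foldl_cons]
    rw [ih]
    have hrow : ∀ j', get3 (xs.foldl (fun dp x => if j = x then dp
        else upd3 dp (i + 1) (updBit sm di x) x (get3 dp i sm j)) dp) i sm j'
        = get3 dp i sm j' := by
      intro j'
      rw [foldX i sm di j xs hxs dp i sm j', if_neg]
      · ring
      · rintro ⟨h1, -⟩; omega
    have hsum : (js.map (fun j' => if j' = c then 0 else
        get3 (xs.foldl (fun dp x => if j = x then dp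
        else upd3 dp (i + 1) (updBit sm di x) x (get3 dp i sm j)) dp) i sm j')).sum
        = (js.map (fun j' => if j' = c then 0 else get3 dp i sm j')).sum := by
      congr 1
      apply List.map_congr_left
      intro a _
      rw [hrow]
    rw [hsum, foldX i sm di j xs hxs dp a b c]
    by_cases hC : a = i + 1 ∧ c ∈ xs ∧ b = updBit sm di c
    · rw [if_pos hC, if_pos hC, List.map_cons, List.sum_cons]
      by_cases hjc : j = c
      · rw [if_neg (by rintro ⟨-, -, h3, -⟩; exact h3 hjc), if_pos hjc]; ring
      · rw [if_pos ⟨hC.1, hC.2.1, hjc, hC.2.2⟩, if_neg hjc]; ring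
    · rw [if_neg hC, if_neg hC, if_neg (by rintro ⟨h1, h2, -, h4⟩; exact hC ⟨h1, h2, h4⟩)]
      ring

lemma bodyA_rows (p : List Char) (i : Nat) (hdi : (digitVal (p.getD i '0')).toNat < 10)
    (dp : Tbl) (hzero : ∀ b c, get3 dp (i + 1) b c = 0) :
    (∀ a b c, a ≠ i + 1 → get3 (bodyA p dp i) a b c = get3 dp a b c) ∧
    (∀ c, get3 (bodyA p dp i) (i + 1) 0 c
      = stepT (digitVal (p.getD i '0')).toNat (get3 dp i 0) c) ∧
    (∀ c, get3 (bodyA p dp i) (i + 1) 1 c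
      = stepS (digitVal (p.getD i '0')).toNat (get3 dp i 0) (get3 dp i 1) c) := by
  set d := (digitVal (p.getD i '0')).toNat with hd
  have key : ∀ a b c, get3 (bodyA p dp i) a b c = get3 dp a b c
      + (if a = i + 1 ∧ c ∈ List.range (d + 1) ∧ b = updBit 0 d c then
          ((List.range 10).map (fun j => if j = c then 0 else get3 dp i 0 j)).sum else 0)
      + (if a = i + 1 ∧ c ∈ List.range 10 ∧ b = updBit 1 d c then
          ((List.range 10).map (fun j => if j = c then 0 else get3 dp i 1 j)).sum else 0) := by
    intro a b c
    simp only [bodyA]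
    rw [← hd]
    rw [show List.range 2 = [0, 1] from rfl, List.foldl_cons, List.foldl_cons, List.foldl_nil]
    simp only [reduceIte, show ((0:Nat) = 1) = False from by simp, if_false]
    rw [foldJ i 1 d (List.range 10) List.nodup_range (List.range 10) _ a b c]
    have hrow : ∀ sm j', get3 ((List.range 10).foldl (fun dp j => (List.range (d + 1)).foldl
        (fun dp x => if j = x then dp else upd3 dp (i + 1) (updBit 0 d x) x (get3 dp i 0 j)) dp)
        dp) i sm j' = get3 dp i sm j' := by
      intro sm j'
      rw [foldJ i 0 d (List.range (d + 1)) List.nodup_range (List.range 10) dp i sm j',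
        if_neg (by rintro ⟨h1, -⟩; omega)]
      ring
    have hsum : ((List.range 10).map (fun j => if j = c then 0 else
        get3 ((List.range 10).foldl (fun dp j => (List.range (d + 1)).foldl
        (fun dp x => if j = x then dp else upd3 dp (i + 1) (updBit 0 d x) x (get3 dp i 0 j)) dp)
        dp) i 1 j)).sum
        = ((List.range 10).map (fun j => if j = c then 0 else get3 dp i 1 j)).sum := by
      congr 1
      apply List.map_congr_left
      intro a _
      rw [hrow]
    rw [hsum, foldJ i 0 d (List.range (d + 1)) List.nodup_range (List.range 10) dp a b c]
  refine ⟨?_, ?_, ?_⟩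
  · intro a b c ha
    rw [key a b c, if_neg (by rintro ⟨h1, -⟩; exact ha h1),
      if_neg (by rintro ⟨h1, -⟩; exact ha h1)]
    ring
  · intro c
    rw [key, hzero 0 c]
    by_cases hc : c = d
    · subst hc
      rw [if_pos ⟨rfl, by simp [List.mem_range], by simp [updBit]⟩,
        if_neg (by rintro ⟨-, -, h⟩; simp [updBit] at h),
        listSumNe _ _ hdi]
      simp [stepT]
    · rw [if_neg (by
          rintro ⟨-, hm, hb⟩
          simp [List.mem_range] at hm
          rcases Nat.lt_or_ge c d with h | h
          · simp [updBit, h] at hb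
          · omega),
        if_neg (by rintro ⟨-, -, h⟩; simp [updBit] at h)]
      simp [stepT, hc]
  · intro c
    rw [key, hzero 1 c]
    by_cases hc10 : c < 10
    · by_cases hcd : c < d
      · rw [if_pos ⟨rfl, by simp [List.mem_range]; omega, by simp [updBit, hcd]⟩,
          if_pos ⟨rfl, by simp [List.mem_range, hc10], by simp [updBit]⟩,
          listSumNe _ _ hc10, listSumNe _ _ hc10]
        simp only [stepS, if_pos hc10, if_pos hcd]
        ring
      · rw [if_neg (by rintro ⟨-, -, hb⟩; simp [updBit, hcd] at hb),
          if_pos ⟨rfl, by simp [List.mem_range, hc10], by simp [updBit]⟩,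
          listSumNe _ _ hc10]
        simp only [stepS, if_pos hc10, if_neg hcd]
        ring
    · rw [if_neg (by rintro ⟨-, hm, -⟩; simp [List.mem_range] at hm; omega),
        if_neg (by rintro ⟨-, hm, -⟩; simp [List.mem_range] at hm; omega)]
      simp [stepS, hc10]

lemma foldA (p : List Char) (hp : ∀ c ∈ p, ∃ k, k < 10 ∧ c = Nat.digitChar k) :
    ∀ k, k ≤ p.length →
      tblOK ((List.range k).foldl (bodyA p) (PySem.Dict.empty.insert (0, 0, 0) 1)) k
        ((p.take k).foldl (fun ts ch => stepPair (digitVal ch).toNat ts)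
          (fun c => if c = 0 then (1 : Int) else 0, fun _ => 0)) := by
  intro k
  induction k with
  | zero =>
    intro _
    simp only [List.range_zero, List.take_zero, List.foldl_nil]
    refine ⟨fun c => by simp [get3_init], fun c => by simp [get3_init],
      fun a b c ha => by
        show get3 _ a b c = 0
        rw [get3_init, if_neg (by rintro ⟨h1, -⟩; omega)]⟩
  | succ k ih =>
    intro hk1
    have hklt : k < p.length := hk1
    obtain ⟨I1, I2, I3⟩ := ih (by omega)
    have hmem : p.getD k '0' ∈ p := by
      rw [List.getD_eq_getElem _ _ hklt]; exact List.getElem_mem _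
    obtain ⟨k', hk', hck⟩ := hp _ hmem
    have hdi : (digitVal (p.getD k '0')).toNat < 10 := by
      rw [hck, digitVal_digitChar k' hk']; simpa using hk'
    set dpk := (List.range k).foldl (bodyA p)
      (PySem.Dict.empty.insert ((0 : Nat), (0 : Nat), (0 : Nat)) (1 : Int)) with hdpk
    set tsk := (p.take k).foldl (fun ts ch => stepPair (digitVal ch).toNat ts)
      (fun c => if c = 0 then (1 : Int) else 0, fun _ => 0) with htsk
    obtain ⟨B1, B2, B3⟩ := bodyA_rows p k hdi dpk (fun b c => I3 (k + 1) b c (by omega))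
    have ht : get3 dpk k 0 = tsk.1 := funext I1
    have hs : get3 dpk k 1 = tsk.2 := funext I2
    rw [List.range_succ, List.foldl_append, List.foldl_cons, List.foldl_nil]
    rw [List.take_add_one, List.getElem?_eq_getElem hklt, Option.toList_some,
      List.foldl_append, List.foldl_cons, List.foldl_nil]
    have hgd : p[k] = p.getD k '0' := (List.getD_eq_getElem _ _ hklt).symm
    refine ⟨?_, ?_, ?_⟩
    · intro c
      rw [← hdpk, B2 c, ht, hgd, ← htsk]
      rfl
    · intro c
      rw [← hdpk, B3 c, ht, hs, hgd, ← htsk]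
      rfl
    · intro a b c ha
      rw [← hdpk, B1 a b c (by omega)]
      exact I3 a b c (by omega)

lemma sumInd (prev : Nat) (hprev : prev < 10) (v : Int) :
    sum10 (fun c => if c = prev then v else 0) = v := by
  rw [sum10, Finset.sum_ite_eq' (Finset.range 10) prev (fun _ => v)]
  simp [Finset.mem_range.mpr hprev]

lemma sumIteLt (g : Nat → Int) (d : Nat) (hd : d ≤ 10) :
    ∑ c ∈ Finset.range 10, (if c < d then g c else 0) = ∑ c ∈ Finset.range d, g c := by
  rw [← Finset.sum_subset (by intro x hx; rw [Finset.mem_range] at *; omega :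
      Finset.range d ⊆ Finset.range 10)
    (fun c _ hcd => if_neg (fun h => hcd (Finset.mem_range.mpr h)))]
  exact Finset.sum_congr rfl (fun c hc => if_pos (Finset.mem_range.mp hc))

lemma specMain : ∀ (ds : List Nat), (∀ d ∈ ds, d < 10) → ∀ (prev : Nat), prev < 10 →
    ∀ (v : Int) (s : Nat → Int),
    sum10 (ds.foldl (fun ts d => stepPair d ts) (fun c => if c = prev then v else 0, s)).1 +
      sum10 (ds.foldl (fun ts d => stepPair d ts) (fun c => if c = prev then v else 0, s)).2
    = 9 ^ ds.length * sum10 s + v * gAcc ds prev := by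
  intro ds
  induction ds with
  | nil =>
    intro _ prev hprev v s
    simp only [List.foldl_nil, List.length_nil, pow_zero, gAcc]
    rw [sumInd prev hprev v]
    ring
  | cons d ds ih =>
    intro hds prev hprev v s
    have hd10 : d < 10 := hds d List.mem_cons_self
    rw [List.foldl_cons]
    have hT : stepT d (fun c => if c = prev then v else 0)
        = (fun c => if c = d then (if d = prev then 0 else v) else 0) := by
      funext c
      simp only [stepT]
      rw [sumInd prev hprev v]
      by_cases hc : c = d <;> by_cases hdp : d = prev <;> simp [hc, hdp]
    have hS : sum10 (stepS d (fun c => if c = prev then v else 0) s)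
        = 9 * sum10 s + v * ((d : Int) - if prev < d then 1 else 0) := by
      simp only [sum10, stepS]
      rw [Finset.sum_congr rfl (fun c hc => by
        rw [if_pos (Finset.mem_range.mp hc)])]
      rw [Finset.sum_add_distrib, Finset.sum_sub_distrib, Finset.sum_const]
      have hsv : (∑ x ∈ Finset.range 10, if x = prev then v else 0) = v := by
        have h := sumInd prev hprev v
        simpa [sum10] using h
      simp only [hsv]
      rw [sumIteLt (fun c => v - if c = prev then v else 0) d (by omega)]
      rw [Finset.sum_sub_distrib, Finset.sum_const, Finset.sum_ite_eq' (Finset.range d) prev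
        (fun _ => v)]
      by_cases hpd : prev < d <;>
        simp [hpd, Finset.mem_range] <;> ring
    rw [show stepPair d (fun c => if c = prev then v else 0, s)
        = (stepT d (fun c => if c = prev then v else 0),
           stepS d (fun c => if c = prev then v else 0) s) from rfl]
    rw [hT, ih (fun d' hd' => hds d' (List.mem_cons_of_mem d hd')) d hd10
      (if d = prev then 0 else v) (stepS d (fun c => if c = prev then v else 0) s), hS]
    simp only [gAcc, List.length_cons]
    by_cases hdp : d = prev <;> simp [hdp] <;> ring

lemma goB_eq (M : Nat) : ∀ (cs : List Char) (i pn : Nat) (total : Int),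
    (∀ c ∈ cs, ∃ k, k < 10 ∧ c = Nat.digitChar k) → i + cs.length = M →
    solveAltGo M cs i (pn : Int) total
      = total + gAcc (cs.map (fun c => (digitVal c).toNat)) pn := by
  intro cs
  induction cs with
  | nil => intro i pn total _ _; simp [solveAltGo, gAcc]
  | cons ch rest ih =>
    intro i pn total hds hlen
    obtain ⟨k, hk, hc⟩ := hds ch List.mem_cons_self
    have hdv : digitVal ch = (k : Int) := by rw [hc]; exact digitVal_digitChar k hk
    have hexp : M - 1 - i = rest.length := by
      simp only [List.length_cons] at hlen; omega
    simp only [solveAltGo, hdv, hexp, List.map_cons, gAcc, List.length_map,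
      Int.toNat_natCast]
    by_cases hEq : k = pn
    · rw [if_pos (by exact_mod_cast hEq), if_pos hEq]
      simp only [Nat.cast_lt]
      ring
    · rw [if_neg (by exact_mod_cast hEq), if_neg hEq,
        ih (i + 1) k (total + ((k : Int) - if (pn : Int) < (k : Int) then 1 else 0)
            * (9 : Int) ^ rest.length)
          (fun c' hc' => hds c' (List.mem_cons_of_mem ch hc')) (by
            simp only [List.length_cons] at hlen ⊢; omega)]
      simp only [Nat.cast_lt]
      ring

lemma foldl_add10 (f : Nat → Int) :
    (List.range 10).foldl (fun s x => s + f x) 0 = sum10 f := by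
  rw [PySem.List.foldl_add, listSum_range 10 f, ← sum10, zero_add]

lemma solve_eq_gAcc (N : Int) (hN : 0 ≤ N) :
    solve N = gAcc ((PySem.Int.toChars N).map (fun c => (digitVal c).toNat)) 0 := by
  have hp := toChars_digits N hN
  simp only [solve]
  rw [PySem.Int.toList_toStr]
  set p := PySem.Int.toChars N with hpdef
  rw [foldl_add10, foldl_add10]
  obtain ⟨I1, I2, -⟩ := foldA p hp p.length (le_refl _)
  rw [List.take_length] at I1 I2
  have e1 : get3 ((List.range p.length).foldl (bodyA p)
      (PySem.Dict.empty.insert ((0 : Nat), (0 : Nat), (0 : Nat)) (1 : Int))) p.length 0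
      = (p.foldl (fun ts ch => stepPair (digitVal ch).toNat ts)
        (fun c => if c = 0 then (1 : Int) else 0, fun _ => 0)).1 := funext I1
  have e2 : get3 ((List.range p.length).foldl (bodyA p)
      (PySem.Dict.empty.insert ((0 : Nat), (0 : Nat), (0 : Nat)) (1 : Int))) p.length 1
      = (p.foldl (fun ts ch => stepPair (digitVal ch).toNat ts)
        (fun c => if c = 0 then (1 : Int) else 0, fun _ => 0)).2 := funext I2
  rw [e1, e2, show (p.foldl (fun ts ch => stepPair (digitVal ch).toNat ts)
      (fun c => if c = 0 then (1 : Int) else 0, fun _ => 0))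
    = ((p.map (fun c => (digitVal c).toNat)).foldl (fun ts d => stepPair d ts)
      (fun c => if c = 0 then (1 : Int) else 0, fun _ => 0)) from by rw [List.foldl_map]]
  have hds : ∀ d ∈ p.map (fun c => (digitVal c).toNat), d < 10 := by
    intro d hd
    obtain ⟨c, hc, rfl⟩ := List.mem_map.mp hd
    obtain ⟨k, hk, hck⟩ := hp c hc
    rw [hck, digitVal_digitChar k hk]
    simpa using hk
  rw [specMain (p.map (fun c => (digitVal c).toNat)) hds 0 (by omega) 1 (fun _ => 0)]
  simp [sum10]

lemma solve_alt_eq_gAcc (N : Int) (hN : 0 ≤ N) :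
    solve_alt N = gAcc ((PySem.Int.toChars N).map (fun c => (digitVal c).toNat)) 0 := by
  have hp := toChars_digits N hN
  show solveAltGo (PySem.Int.toStr N).toList.length (PySem.Int.toStr N).toList 0 ((0 : Nat) : Int) 0
      = _
  rw [goB_eq _ _ 0 0 0 (by rw [PySem.Int.toList_toStr]; exact hp)
    (by simp), PySem.Int.toList_toStr]
  ring

-- ===== VERDICT (by name: the statement is the Claim_ definition above) =====
theorem solve_spec : Claim_equal_solve := by
  intro N _ hN
  unfold Spec_solve
  rw [solve_eq_gAcc N hN, solve_alt_eq_gAcc N hN]
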